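-- pv_equiv track=rewrite | github.com/petelindsey/wc3_kinematics_tool | wc3kin/viewer/sampler.py | _find_bracketing_keys
-- ===== SOURCE A (Python) =====
-- def _find_bracketing_keys(times: list[int], t_ms: int) -> tuple[int, int]:
--     """
--     Returns (i0, i1) indices into times such that times[i0] <= t <= times[i1].
--     If t is outside range, returns nearest endpoint pair (0,0) or (n-1,n-1).
--     """
--     n = len(times)
--     if n == 0:
--         return (0, 0)
--     if t_ms <= times[0]:
--         return (0, 0)
--     if t_ms >= times[-1]:
--         return (n - 1, n - 1)
--
--     # binary search
--     lo, hi = 0, n - 1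
--     while lo + 1 < hi:
--         mid = (lo + hi) // 2
--         if times[mid] <= t_ms:
--             lo = mid
--         else:
--             hi = mid
--     return (lo, hi)
-- ===== SOURCE B (Python) =====
-- def _find_bracketing_keys(times: list[int], t_ms: int) -> tuple[int, int]:
--     n = len(times)
--     if n == 0:
--         return (0, 0)
--     if t_ms <= times[0]:
--         return (0, 0)
--     if t_ms >= times[-1]:
--         return (n - 1, n - 1)
--     # linear forward scan: first i with times[i] > t_ms brackets t_ms as (i-1, i)
--     i = 1
--     while times[i] <= t_ms:
--         i += 1
--     return (i - 1, i)
-- ===== Notes on version B (the rewrite author's own statement) =====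
-- stated objective: simpler
-- what changed: Replaces the binary-search while-loop with a single linear forward scan that returns (i-1, i) at the first index i with times[i] > t_ms; identical guard clauses, same unique bracketing pair on sorted input.
-- outside the precondition, e.g. on _find_bracketing_keys([0, 9, 1, 5, 10], 2): A returns (2, 3), B returns (0, 1)
import Mathlib
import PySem

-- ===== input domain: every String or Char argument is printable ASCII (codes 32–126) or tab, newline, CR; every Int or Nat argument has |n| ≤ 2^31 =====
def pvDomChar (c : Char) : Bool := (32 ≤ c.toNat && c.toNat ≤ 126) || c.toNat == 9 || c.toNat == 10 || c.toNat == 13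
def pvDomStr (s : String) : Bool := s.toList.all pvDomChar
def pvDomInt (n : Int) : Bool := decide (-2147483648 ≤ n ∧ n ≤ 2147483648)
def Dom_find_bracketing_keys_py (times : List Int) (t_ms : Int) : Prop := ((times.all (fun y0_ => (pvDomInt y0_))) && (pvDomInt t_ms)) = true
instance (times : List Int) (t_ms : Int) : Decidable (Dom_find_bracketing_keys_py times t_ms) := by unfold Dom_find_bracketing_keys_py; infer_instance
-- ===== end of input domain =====

-- B replaces A's binary-search loop with a single linear forward scan (simpler; same guards,
-- same unique bracketing pair on sorted input).


-- ===== PORT A =====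
-- the 'while lo + 1 < hi' binary-search loop; times[mid] via pyGet? (mid provably in range, so getD 0 is exact)
def pvBsLoop (times : List Int) (t_ms lo hi : Int) : Int × Int :=
  if _h : lo + 1 < hi then
    let mid := PySem.Int.floordiv (lo + hi) 2
    if (PySem.List.pyGet? times mid).getD 0 ≤ t_ms then
      pvBsLoop times t_ms mid hi
    else
      pvBsLoop times t_ms lo mid
  else (lo, hi)
termination_by (hi - lo).toNat
decreasing_by
  · rw [PySem.Int.floordiv_eq_ediv_of_pos (by norm_num)]; omega
  · rw [PySem.Int.floordiv_eq_ediv_of_pos (by norm_num)]; omega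

def find_bracketing_keys_py (times : List Int) (t_ms : Int) : Int × Int :=
  let n : Int := times.length
  if n = 0 then (0, 0)
  else if t_ms ≤ (PySem.List.pyGet? times 0).getD 0 then (0, 0)
  else if t_ms ≥ (PySem.List.pyGet? times (-1)).getD 0 then (n - 1, n - 1)
  else pvBsLoop times t_ms 0 (n - 1)

-- ===== PORT B =====
-- the 'while times[i] <= t_ms: i += 1' scan; under Pre_ the out-of-range branch is unreachable
-- (the third guard guarantees t_ms < times[n-1])
def pvScanLoop (times : List Int) (t_ms : Int) (i : Nat) : Int × Int :=
  if h : i < times.length then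
    if times[i] ≤ t_ms then pvScanLoop times t_ms (i + 1)
    else ((i : Int) - 1, (i : Int))
  else ((i : Int) - 1, (i : Int))
termination_by times.length - i

def find_bracketing_keys_py_alt (times : List Int) (t_ms : Int) : Int × Int :=
  let n : Int := times.length
  if n = 0 then (0, 0)
  else if t_ms ≤ (PySem.List.pyGet? times 0).getD 0 then (0, 0)
  else if t_ms ≥ (PySem.List.pyGet? times (-1)).getD 0 then (n - 1, n - 1)
  else pvScanLoop times t_ms 1

-- ===== PRECONDITION & SPEC =====
-- Pre_ restricts to the function's documented natural domain: 'times' sorted non-decreasingly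
-- (the docstring's bracketing contract only makes sense there); it also admits any input decided
-- by the shared guard clauses (t_ms at or beyond the first/last element, or an empty list).
-- Excluded are only unsorted lists whose answer the loops compute: there A's binary search and
-- B's scan legitimately pick different pairs.
def Pre_find_bracketing_keys_py (times : List Int) (t_ms : Int) : Prop :=
  times.Pairwise (· ≤ ·) ∨ t_ms ≤ times[0]?.getD t_ms ∨ times.getLast?.getD t_ms ≤ t_ms
instance (times : List Int) (t_ms : Int) : Decidable (Pre_find_bracketing_keys_py times t_ms) := by
  unfold Pre_find_bracketing_keys_py; infer_instance

def pvWitness_find_bracketing_keys_py : List Int × Int := ([0, 10, 20], 15)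

def Spec_find_bracketing_keys_py (times : List Int) (t_ms : Int) (out : Int × Int) : Prop := out = find_bracketing_keys_py_alt times t_ms
instance (times : List Int) (t_ms : Int) (out : Int × Int) : Decidable (Spec_find_bracketing_keys_py times t_ms out) := by unfold Spec_find_bracketing_keys_py; infer_instance

-- ===== CLAIM (what is proved, stated in full; the proofs are below) =====
def Claim_equal_find_bracketing_keys_py : Prop := ∀ (times : List Int) (t_ms : Int), Dom_find_bracketing_keys_py times t_ms → Pre_find_bracketing_keys_py times t_ms → Spec_find_bracketing_keys_py times t_ms (find_bracketing_keys_py times t_ms)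

-- ===== LEMMAS AND PROOFS =====

-- monotone access into a (· ≤ ·)-pairwise list
theorem pvMono (times : List Int) (hs : times.Pairwise (· ≤ ·))
    {i j : Nat} (hij : i ≤ j) (hj : j < times.length) : times[i]'(by omega) ≤ times[j] := by
  rcases Nat.lt_or_ge i j with h | h
  · exact (List.pairwise_iff_getElem.mp hs) i j (by omega) hj h
  · have : i = j := by omega
    subst this; exact le_refl _

-- a bracketing pair is unique on a sorted list
theorem pvBracketUnique (times : List Int) (t : Int) (hs : times.Pairwise (· ≤ ·))
    {k k' : Nat} (hk : k + 1 < times.length) (hk' : k' + 1 < times.length)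
    (h1 : times[k] ≤ t) (h2 : t < times[k + 1])
    (h1' : times[k'] ≤ t) (h2' : t < times[k' + 1]) : k = k' := by
  by_contra hne
  rcases Nat.lt_or_ge k k' with h | h
  · have := pvMono times hs (show k + 1 ≤ k' by omega) (by omega)
    omega
  · have hlt : k' < k := by omega
    have := pvMono times hs (show k' + 1 ≤ k by omega) (by omega)
    omega

-- B's scan returns a bracketing pair
theorem pvScanBracket (times : List Int) (t : Int) (i : Nat)
    (h1 : 0 < i) (h2 : i < times.length)
    (h3 : times[i - 1]'(by omega) ≤ t)
    (h4 : t < times[times.length - 1]'(by omega)) :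
    ∃ (k : Nat) (hk : k + 1 < times.length),
      pvScanLoop times t i = ((k : Int), (k : Int) + 1) ∧
      times[k]'(by omega) ≤ t ∧ t < times[k + 1]'hk := by
  rw [pvScanLoop]
  simp only [h2, dif_pos]
  by_cases hle : times[i] ≤ t
  · have hi1 : i + 1 < times.length := by
      by_contra hcon
      have hlast : i = times.length - 1 := by omega
      subst hlast; omega
    rw [if_pos hle]
    have h3' : times[(i + 1) - 1]'(by omega) ≤ t := by
      have he : (i + 1) - 1 = i := by omega
      simp only [he]; exact hle
    exact pvScanBracket times t (i + 1) (by omega) hi1 h3' h4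
  · rw [if_neg hle]
    refine ⟨i - 1, by omega, ?_, ?_, ?_⟩
    · have hc : ((i - 1 : Nat) : Int) = (i : Int) - 1 := by omega
      rw [hc]; norm_num
    · exact h3
    · have he : (i - 1) + 1 = i := by omega
      simp only [he]; omega
termination_by times.length - i

-- A's binary search returns a bracketing pair
theorem pvBsBracket (times : List Int) (t : Int) (lo hi : Int)
    (hlo : 0 ≤ lo) (hlt : lo < hi) (hhi : hi < times.length)
    (h3 : times[lo.toNat]'(by omega) ≤ t)
    (h4 : t < times[hi.toNat]'(by omega)) :
    ∃ (k : Nat) (hk : k + 1 < times.length),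
      pvBsLoop times t lo hi = ((k : Int), (k : Int) + 1) ∧
      times[k]'(by omega) ≤ t ∧ t < times[k + 1]'hk := by
  rw [pvBsLoop]
  by_cases h : lo + 1 < hi
  · rw [dif_pos h]
    set mid := PySem.Int.floordiv (lo + hi) 2 with hmid
    have hmb : lo < mid ∧ mid < hi := by
      rw [hmid, PySem.Int.floordiv_eq_ediv_of_pos (by norm_num)]; omega
    have hget : (PySem.List.pyGet? times mid).getD 0 = times[mid.toNat]'(by omega) := by
      rw [PySem.List.pyGet?_eq_some_getElem times (by omega) (by omega)]
      rfl
    simp only [hget]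
    by_cases hle : times[mid.toNat]'(by omega) ≤ t
    · rw [if_pos hle]
      exact pvBsBracket times t mid hi (by omega) (by omega) hhi hle h4
    · rw [if_neg hle]
      exact pvBsBracket times t lo mid hlo (by omega) (by omega) h3 (by omega)
  · rw [dif_neg h]
    have hhe : hi = lo + 1 := by omega
    refine ⟨lo.toNat, by omega, ?_, ?_, ?_⟩
    · have hc : ((lo.toNat : Nat) : Int) = lo := by omega
      rw [hc, hhe]
    · exact h3
    · have he : lo.toNat + 1 = hi.toNat := by omega
      simp only [he]; exact h4
termination_by (hi - lo).toNat
decreasing_by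
  · rw [PySem.Int.floordiv_eq_ediv_of_pos (by norm_num)]; omega
  · rw [PySem.Int.floordiv_eq_ediv_of_pos (by norm_num)]; omega

-- ===== VERDICT (by name: the statement is the Claim_ definition above) =====
theorem find_bracketing_keys_py_spec : Claim_equal_find_bracketing_keys_py := by
  intro times t _dom hpre
  unfold Spec_find_bracketing_keys_py find_bracketing_keys_py find_bracketing_keys_py_alt
  simp only
  by_cases h0 : (times.length : Int) = 0
  · rw [if_pos h0, if_pos h0]
  · rw [if_neg h0, if_neg h0]
    have hn : 0 < times.length := by omega
    have hget0 : (PySem.List.pyGet? times 0).getD 0 = times[0]'hn := by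
      rw [PySem.List.pyGet?_eq_some_getElem times (by omega) (by omega)]
      rfl
    have hgetl : (PySem.List.pyGet? times (-1)).getD 0 = times[times.length - 1]'(by omega) := by
      rw [PySem.List.pyGet?_neg_one, List.getLast?_eq_getElem?,
        List.getElem?_eq_getElem (by omega)]
      rfl
    by_cases h1 : t ≤ (PySem.List.pyGet? times 0).getD 0
    · rw [if_pos h1, if_pos h1]
    · rw [if_neg h1, if_neg h1]
      by_cases h2 : t ≥ (PySem.List.pyGet? times (-1)).getD 0
      · rw [if_pos h2, if_pos h2]
      · rw [if_neg h2, if_neg h2]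
        rw [hget0] at h1
        rw [hgetl] at h2
        have hsort : times.Pairwise (· ≤ ·) := by
          rcases hpre with hs | hg | hg
          · exact hs
          · exfalso
            rw [List.getElem?_eq_getElem hn] at hg
            simp only [Option.getD_some] at hg
            omega
          · exfalso
            rw [List.getLast?_eq_getElem?, List.getElem?_eq_getElem (by omega)] at hg
            simp only [Option.getD_some] at hg
            omega
        have hn2 : 2 ≤ times.length := by
          by_contra hc
          have he : times.length = 1 := by omega
          have hsame : times[0]'hn = times[times.length - 1]'(by omega) := by
            congr 1; omega
          omega
        have hA3 : times[(0 : Int).toNat]'(by simp only [Int.toNat_zero]; omega) ≤ t := by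
          simp only [Int.toNat_zero]; omega
        have hA4 : t < times[((times.length : Int) - 1).toNat]'(by omega) := by
          have hi : ((times.length : Int) - 1).toNat = times.length - 1 := by omega
          simp only [hi]; omega
        obtain ⟨k, hk, hek, hbk1, hbk2⟩ :=
          pvBsBracket times t 0 ((times.length : Int) - 1) (by omega) (by omega) (by omega)
            hA3 hA4
        have hB3 : times[1 - 1]'(by omega) ≤ t := by
          simp only [Nat.sub_self]; omega
        obtain ⟨k', hk', hek', hbk1', hbk2'⟩ :=
          pvScanBracket times t 1 (by omega) (by omega) hB3 (by omega)
        have hkk : k = k' := pvBracketUnique times t hsort hk hk' hbk1 hbk2 hbk1' hbk2'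
        rw [hek, hek', hkk]
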